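-- pv_equiv track=rewrite | github.com/bugzoidTM/UltronLocal | backend/ultronpro/gap_detector.py | _canonical_alert_for_cluster
-- ===== SOURCE A (Python) =====
-- from typing import Any
--
-- def _canonical_alert_for_cluster(items: list[dict[str, Any]]) -> str:
--     priority_order = [
--         'critic_overconfident',
--         'missing_gap_disclosure',
--         'groundedness_low',
--         'quality_score_below_threshold',
--         'critic_revision_needed',
--         'rag_coverage_low',
--         'rag_diversity_low',
--         'rag_redundancy_high',
--         'relevance_low',
--     ]
--     seen = {str(x.get('alert') or '') for x in items}
--     for a in priority_order:
--         if a in seen: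
--             return a
--     return str((items[0] or {}).get('alert') or 'unknown')
-- ===== SOURCE B (Python) =====
-- from typing import Any
--
-- def _canonical_alert_for_cluster(items: list[dict[str, Any]]) -> str:
--     priority_order = [
--         'critic_overconfident',
--         'missing_gap_disclosure',
--         'groundedness_low',
--         'quality_score_below_threshold',
--         'critic_revision_needed',
--         'rag_coverage_low',
--         'rag_diversity_low',
--         'rag_redundancy_high',
--         'relevance_low',
--     ]
--     rank = {a: i for i, a in enumerate(priority_order)}
--     best = None
--     for x in items:
--         r = rank.get(str(x.get('alert') or ''))
--         if r is not None and (best is None or r < best):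
--             best = r
--     if best is not None:
--         return priority_order[best]
--     return str((items[0] or {}).get('alert') or 'unknown')
-- ===== Notes on version B (the rewrite author's own statement) =====
-- stated objective: alternative
-- what changed: A builds a set of the normalized alert strings and scans the fixed priority list for the first member; B builds a name-to-index rank dict once and does a single pass over the items keeping the minimum rank, indexing the priority list at the end.
-- outside the precondition, e.g. on _canonical_alert_for_cluster([]): A raises IndexError, B raises IndexError
import Mathlib
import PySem

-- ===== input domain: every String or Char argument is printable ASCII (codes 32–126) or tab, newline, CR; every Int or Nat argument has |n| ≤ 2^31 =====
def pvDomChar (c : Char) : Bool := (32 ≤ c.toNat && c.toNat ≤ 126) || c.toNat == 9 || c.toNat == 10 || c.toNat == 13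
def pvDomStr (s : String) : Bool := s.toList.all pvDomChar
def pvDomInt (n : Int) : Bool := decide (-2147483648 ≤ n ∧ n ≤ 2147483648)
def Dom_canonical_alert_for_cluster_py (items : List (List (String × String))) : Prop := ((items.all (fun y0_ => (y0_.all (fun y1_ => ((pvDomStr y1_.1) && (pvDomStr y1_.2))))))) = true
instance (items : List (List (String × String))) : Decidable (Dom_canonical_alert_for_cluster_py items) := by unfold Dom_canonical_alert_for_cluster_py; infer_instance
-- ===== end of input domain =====

-- B replaces A's "scan the fixed priority list against a set of seen alerts" by one pass over the
-- items keeping the minimum priority rank (rank dict built once); same return value everywhere in Pre_.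

-- ===== PORT A =====
def pvPriorityA : List String :=
  ["critic_overconfident", "missing_gap_disclosure", "groundedness_low",
   "quality_score_below_threshold", "critic_revision_needed", "rag_coverage_low",
   "rag_diversity_low", "rag_redundancy_high", "relevance_low"]

-- str(x.get('alert') or '') : a missing key and an empty value both give ''
def pvNormA (x : List (String × String)) : String :=
  (PySem.Dict.get? { items := x } "alert").getD ""

-- the 'for a in priority_order: if a in seen: return a' loop
def pvScanA : List String → PySem.Set String → Option String
  | [], _ => none
  | a :: rest, seen => if PySem.Set.contains seen a then some a else pvScanA rest seen

def canonical_alert_for_cluster_py (items : List (List (String × String))) : String :=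
  match pvScanA pvPriorityA (PySem.Set.ofList (items.map pvNormA)) with
  | some a => a
  | none =>
    -- str((items[0] or {}).get('alert') or 'unknown'); items[0] raises IndexError on [] (excluded by Pre_)
    match PySem.List.pyGet? items 0 with
    | none => ""
    | some h =>
      let v := (PySem.Dict.get? { items := h } "alert").getD ""
      if v = "" then "unknown" else v

-- ===== PORT B =====
def pvPriorityB : List String :=
  ["critic_overconfident", "missing_gap_disclosure", "groundedness_low",
   "quality_score_below_threshold", "critic_revision_needed", "rag_coverage_low",
   "rag_diversity_low", "rag_redundancy_high", "relevance_low"]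

-- rank = {a: i for i, a in enumerate(priority_order)}
def pvRankB : PySem.Dict String Int :=
  (PySem.List.enumerate pvPriorityB 0).foldl (fun d p => PySem.Dict.insert d p.2 p.1) PySem.Dict.empty

def pvNormB (x : List (String × String)) : String :=
  (PySem.Dict.get? { items := x } "alert").getD ""

def canonical_alert_for_cluster_py_alt (items : List (List (String × String))) : String :=
  match items.foldl (fun best x =>
    match PySem.Dict.get? pvRankB (pvNormB x) with
    | none => best
    | some r => match best with
      | none => some r
      | some b => if r < b then some r else some b) none with
  | some b => (PySem.List.pyGet? pvPriorityB b).getD ""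
  | none =>
    -- str((items[0] or {}).get('alert') or 'unknown'); items[0] raises IndexError on [] (excluded by Pre_)
    match PySem.List.pyGet? items 0 with
    | none => ""
    | some h =>
      let v := (PySem.Dict.get? { items := h } "alert").getD ""
      if v = "" then "unknown" else v

-- ===== PRECONDITION & SPEC =====
-- Pre_ excludes only items = [], where both Pythons raise IndexError at items[0].
def Pre_canonical_alert_for_cluster_py (items : List (List (String × String))) : Prop := items ≠ []
instance (items : List (List (String × String))) : Decidable (Pre_canonical_alert_for_cluster_py items) := by unfold Pre_canonical_alert_for_cluster_py; infer_instance
def pvWitness_canonical_alert_for_cluster_py : (List (List (String × String))) := ([[("alert", "relevance_low")], [("alert", "groundedness_low")]])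

def Spec_canonical_alert_for_cluster_py (items : List (List (String × String))) (out : String) : Prop := out = canonical_alert_for_cluster_py_alt items
instance (items : List (List (String × String))) (out : String) : Decidable (Spec_canonical_alert_for_cluster_py items out) := by unfold Spec_canonical_alert_for_cluster_py; infer_instance

-- ===== CLAIM (what is proved, stated in full; the proofs are below) =====
def Claim_equal_canonical_alert_for_cluster_py : Prop := ∀ (items : List (List (String × String))), Dom_canonical_alert_for_cluster_py items → Pre_canonical_alert_for_cluster_py items → Spec_canonical_alert_for_cluster_py items (canonical_alert_for_cluster_py items)

-- ===== LEMMAS AND PROOFS =====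

-- the Nat-rank shadow of B's minimum loop
def pvStepN (P : List String) (b : Option Nat) (v : String) : Option Nat :=
  match PySem.List.index? P v with
  | none => b
  | some r => match b with
    | none => some r
    | some bb => if r < bb then some r else some bb

lemma pvStepN_none {P : List String} {v : String} (acc : Option Nat)
    (h : PySem.List.index? P v = none) : pvStepN P acc v = acc := by
  simp only [pvStepN]; rw [h]

lemma pvStepN_some {P : List String} {v : String} {r : Nat} (acc : Option Nat)
    (h : PySem.List.index? P v = some r) :
    pvStepN P acc v = (match acc with | none => some r | some bb => if r < bb then some r else some bb) := by
  simp only [pvStepN]; rw [h]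

lemma pvRank_eq (v : String) :
    PySem.Dict.get? pvRankB v = (PySem.List.index? pvPriorityB v).map (fun n => (n : Int)) := by
  have hR : pvRankB = ({ items := [("critic_overconfident", (0:Int)), ("missing_gap_disclosure", 1),
      ("groundedness_low", 2), ("quality_score_below_threshold", 3), ("critic_revision_needed", 4),
      ("rag_coverage_low", 5), ("rag_diversity_low", 6), ("rag_redundancy_high", 7),
      ("relevance_low", 8)] } : PySem.Dict String Int) := by decide
  rw [hR]
  cases hb1 : ("critic_overconfident" == v) with
  | true =>
    simp only [PySem.Dict.get?, List.find?, pvPriorityB, PySem.List.index?, List.idxOf?,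
      List.findIdx?, List.findIdx?.go, hb1, Option.map_some]
    simp
  | false =>
    cases hb2 : ("missing_gap_disclosure" == v) with
    | true =>
      simp only [PySem.Dict.get?, List.find?, pvPriorityB, PySem.List.index?, List.idxOf?,
        List.findIdx?, List.findIdx?.go, hb1, hb2, Option.map_some]
      simp
    | false =>
      cases hb3 : ("groundedness_low" == v) with
      | true =>
        simp only [PySem.Dict.get?, List.find?, pvPriorityB, PySem.List.index?, List.idxOf?,
          List.findIdx?, List.findIdx?.go, hb1, hb2, hb3, Option.map_some]
        simp
      | false =>
        cases hb4 : ("quality_score_below_threshold" == v) with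
        | true =>
          simp only [PySem.Dict.get?, List.find?, pvPriorityB, PySem.List.index?, List.idxOf?,
            List.findIdx?, List.findIdx?.go, hb1, hb2, hb3, hb4, Option.map_some]
          simp
        | false =>
          cases hb5 : ("critic_revision_needed" == v) with
          | true =>
            simp only [PySem.Dict.get?, List.find?, pvPriorityB, PySem.List.index?, List.idxOf?,
              List.findIdx?, List.findIdx?.go, hb1, hb2, hb3, hb4, hb5, Option.map_some]
            simp
          | false =>
            cases hb6 : ("rag_coverage_low" == v) with
            | true =>
              simp only [PySem.Dict.get?, List.find?, pvPriorityB, PySem.List.index?, List.idxOf?,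
                List.findIdx?, List.findIdx?.go, hb1, hb2, hb3, hb4, hb5, hb6, Option.map_some]
              simp
            | false =>
              cases hb7 : ("rag_diversity_low" == v) with
              | true =>
                simp only [PySem.Dict.get?, List.find?, pvPriorityB, PySem.List.index?, List.idxOf?,
                  List.findIdx?, List.findIdx?.go, hb1, hb2, hb3, hb4, hb5, hb6, hb7, Option.map_some]
                simp
              | false =>
                cases hb8 : ("rag_redundancy_high" == v) with
                | true =>
                  simp only [PySem.Dict.get?, List.find?, pvPriorityB, PySem.List.index?, List.idxOf?,
                    List.findIdx?, List.findIdx?.go, hb1, hb2, hb3, hb4, hb5, hb6, hb7, hb8, Option.map_some]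
                  simp
                | false =>
                  cases hb9 : ("relevance_low" == v) with
                  | true =>
                    simp only [PySem.Dict.get?, List.find?, pvPriorityB, PySem.List.index?, List.idxOf?,
                      List.findIdx?, List.findIdx?.go, hb1, hb2, hb3, hb4, hb5, hb6, hb7, hb8, hb9]
                    simp
                  | false =>
                    simp only [PySem.Dict.get?, List.find?, pvPriorityB, PySem.List.index?, List.idxOf?,
                      List.findIdx?, List.findIdx?.go, hb1, hb2, hb3, hb4, hb5, hb6, hb7, hb8, hb9]
                    simp


lemma pvFold_nil (S : List String) (acc : Option Nat) :
    S.foldl (pvStepN []) acc = acc := by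
  induction S generalizing acc with
  | nil => rfl
  | cons v S ih =>
    rw [List.foldl_cons, pvStepN_none acc (by rw [PySem.List.index?_eq_none_iff]; simp), ih]

lemma pvFold_mono (P : List String) (S : List String) (b : Nat) :
    ∃ r, S.foldl (pvStepN P) (some b) = some r ∧ r ≤ b := by
  induction S generalizing b with
  | nil => exact ⟨b, rfl, le_refl b⟩
  | cons v S ih =>
    rw [List.foldl_cons]
    cases h : PySem.List.index? P v with
    | none => rw [pvStepN_none _ h]; exact ih b
    | some r =>
      rw [pvStepN_some _ h]
      by_cases hr : r < b
      · obtain ⟨r', h1, h2⟩ := ih r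
        exact ⟨r', by simpa [hr] using h1, le_trans h2 (le_of_lt hr)⟩
      · obtain ⟨r', h1, h2⟩ := ih b
        exact ⟨r', by simpa [hr] using h1, h2⟩

lemma pvFold_hit0 (P : List String) (S : List String) :
    ∀ acc : Option Nat, (∃ v ∈ S, PySem.List.index? P v = some 0) →
    S.foldl (pvStepN P) acc = some 0 := by
  induction S with
  | nil => intro acc h; simp at h
  | cons w S ih =>
    intro acc h
    rw [List.foldl_cons]
    rcases h with ⟨v, hv, hidx⟩
    rcases List.mem_cons.mp hv with rfl | hvS
    · have hstep : pvStepN P acc v = some 0 := by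
        rw [pvStepN_some _ hidx]
        cases acc with
        | none => rfl
        | some bb =>
          by_cases hbb : 0 < bb
          · simp [hbb]
          · have : bb = 0 := by omega
            simp [this]
      rw [hstep]
      obtain ⟨r, h1, h2⟩ := pvFold_mono P S 0
      rw [h1, Nat.le_zero.mp h2]
    · exact ih _ ⟨v, hvS, hidx⟩

lemma pvFold_shift (a : String) (P : List String) (S : List String)
    (hne : ∀ v ∈ S, v ≠ a) (acc : Option Nat) :
    S.foldl (pvStepN (a :: P)) (acc.map (· + 1)) = (S.foldl (pvStepN P) acc).map (· + 1) := by
  induction S generalizing acc with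
  | nil => rfl
  | cons v S ih =>
    have hva : a ≠ v := fun h => hne v (List.mem_cons_self ..) h.symm
    have hidx : PySem.List.index? (a :: P) v = (PySem.List.index? P v).map (· + 1) :=
      PySem.List.index?_cons_of_ne _ hva
    have hstep : pvStepN (a :: P) (acc.map (· + 1)) v = (pvStepN P acc v).map (· + 1) := by
      cases h : PySem.List.index? P v with
      | none =>
        rw [pvStepN_none _ (by rw [hidx, h]; rfl), pvStepN_none _ h]
      | some r =>
        rw [pvStepN_some _ (show PySem.List.index? (a :: P) v = some (r + 1) by rw [hidx, h]; rfl),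
            pvStepN_some _ h]
        cases acc with
        | none => rfl
        | some bb =>
          by_cases hr : r < bb <;> simp [hr]
    rw [List.foldl_cons, List.foldl_cons, hstep]
    exact ih (fun v hv => hne v (List.mem_cons_of_mem _ hv)) _

lemma pvFold_lt (P : List String) (S : List String) (acc : Option Nat)
    (hacc : ∀ b, acc = some b → b < P.length) (r : Nat)
    (h : S.foldl (pvStepN P) acc = some r) : r < P.length := by
  induction S generalizing acc with
  | nil => exact hacc r h
  | cons v S ih =>
    rw [List.foldl_cons] at h
    refine ih _ ?_ h
    intro b hb
    cases hidx : PySem.List.index? P v with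
    | none => exact hacc b (by rwa [pvStepN_none _ hidx] at hb)
    | some k =>
      have hk : k < P.length := by
        obtain ⟨hk', _, _⟩ := PySem.List.getElem_of_index?_eq_some hidx
        exact hk'
      rw [pvStepN_some _ hidx] at hb
      cases hc : acc with
      | none =>
        rw [hc] at hb
        simp only [Option.some.injEq] at hb
        omega
      | some bb =>
        have hbb := hacc bb hc
        rw [hc] at hb
        by_cases hr : k < bb <;> simp only [hr, reduceIte,
          Option.some.injEq] at hb <;> omega

lemma pvScan_min (P : List String) (S : List String) :
    pvScanA P (PySem.Set.ofList S) = (S.foldl (pvStepN P) none).bind (fun r => P[r]?) := by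
  induction P with
  | nil => simp [pvScanA, pvFold_nil]
  | cons a P ih =>
    by_cases hmem : a ∈ S
    · have hc : PySem.Set.contains (PySem.Set.ofList S) a = true := by
        simp [PySem.Set.mem_ofList, hmem]
      have hfold : S.foldl (pvStepN (a :: P)) none = some 0 :=
        pvFold_hit0 _ _ none ⟨a, hmem, PySem.List.index?_cons_self a P⟩
      simp only [pvScanA, hc, if_true, hfold, Option.bind_some]
      rfl
    · have hc : PySem.Set.contains (PySem.Set.ofList S) a = false := by
        simp [PySem.Set.mem_ofList, hmem]
      have hfold : S.foldl (pvStepN (a :: P)) none = (S.foldl (pvStepN P) none).map (· + 1) := by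
        have := pvFold_shift a P S (fun v hv h => hmem (h ▸ hv)) none
        simpa using this
      rw [hfold]
      simp only [pvScanA, hc, Bool.false_eq_true, if_false, ih]
      cases S.foldl (pvStepN P) none with
      | none => rfl
      | some r => simp

lemma pvBridge (S : List String) :
    ∀ (accN : Option Nat) (accI : Option Int), accI = accN.map (fun n => (n : Int)) →
    S.foldl (fun best v =>
      match PySem.Dict.get? pvRankB v with
      | none => best
      | some r => match best with
        | none => some r
        | some b => if r < b then some r else some b) accI
    = (S.foldl (pvStepN pvPriorityB) accN).map (fun n => (n : Int)) := by
  induction S with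
  | nil => intro accN accI hrel; simpa using hrel
  | cons v S ih =>
    intro accN accI hrel
    rw [List.foldl_cons, List.foldl_cons]
    apply ih
    subst hrel
    cases h : PySem.List.index? pvPriorityB v with
    | none =>
      have hget : PySem.Dict.get? pvRankB v = none := by rw [pvRank_eq, h]; rfl
      rw [pvStepN_none _ h]
      simp only [hget]
    | some r =>
      have hget : PySem.Dict.get? pvRankB v = some (r : Int) := by rw [pvRank_eq, h]; rfl
      rw [pvStepN_some _ h]
      simp only [hget]
      cases accN with
      | none => rfl
      | some bb =>
        by_cases hr : r < bb
        · have hri : ((r : Int) < (bb : Int)) := by exact_mod_cast hr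
          simp [hr, hri]
        · have hri : ¬ ((r : Int) < (bb : Int)) := by exact_mod_cast hr
          simp [hr, hri]

-- ===== VERDICT (by name: the statement is the Claim_ definition above) =====
theorem canonical_alert_for_cluster_py_spec : Claim_equal_canonical_alert_for_cluster_py := by
  intro items _ _
  unfold Spec_canonical_alert_for_cluster_py
  unfold canonical_alert_for_cluster_py canonical_alert_for_cluster_py_alt
  have hmap : (items.foldl (fun best x =>
      match PySem.Dict.get? pvRankB (pvNormB x) with
      | none => best
      | some r => match best with
        | none => some r
        | some b => if r < b then some r else some b) none)
    = ((items.map pvNormA).foldl (fun best v =>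
      match PySem.Dict.get? pvRankB v with
      | none => best
      | some r => match best with
        | none => some r
        | some b => if r < b then some r else some b) none) := by
    rw [List.foldl_map]
    rfl
  rw [hmap]
  have hbridge := pvBridge (items.map pvNormA) none none rfl
  rw [hbridge]
  rw [show pvPriorityA = pvPriorityB from rfl, pvScan_min pvPriorityB (items.map pvNormA)]
  cases hfold : (items.map pvNormA).foldl (pvStepN pvPriorityB) none with
  | none => rfl
  | some r =>
    have hlt : r < pvPriorityB.length :=
      pvFold_lt pvPriorityB (items.map pvNormA) none (by simp) r hfold
    simp [List.getElem?_eq_getElem hlt, PySem.List.pyGet?_natCast]
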